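-- pv_equiv track=rewrite | github.com/SyncHot/ethos-os-ethos-apps | apps/ldap/backend.py | _determine_role
-- ===== SOURCE A (Python) =====
-- def _determine_role(member_of_dns, cfg):
--     """Determine EthOS role based on LDAP group membership."""
--     def _cn_match(dn_list, group_names):
--         for dn in dn_list:
--             cn = dn.split(',')[0].replace('CN=', '').replace('cn=', '').strip()
--             if cn.lower() in [g.lower() for g in group_names]:
--                 return True
--         return False
--
--     admin_groups = cfg.get('admin_groups', [])
--     family_groups = cfg.get('family_groups', [])
--
--     if admin_groups and _cn_match(member_of_dns, admin_groups):
--         return 'admin'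
--     if family_groups and _cn_match(member_of_dns, family_groups):
--         return 'family'
--     return 'user'
-- ===== SOURCE B (Python) =====
-- def _determine_role(member_of_dns, cfg):
--     """Determine EthOS role based on LDAP group membership."""
--     member_cns = {dn.split(',')[0].replace('CN=', '').replace('cn=', '').strip().lower()
--                   for dn in member_of_dns}
--
--     admin_groups = cfg.get('admin_groups', [])
--     if admin_groups and any(g.lower() in member_cns for g in admin_groups):
--         return 'admin'
--     family_groups = cfg.get('family_groups', [])
--     if family_groups and any(g.lower() in member_cns for g in family_groups):
--         return 'family'
--     return 'user'
-- ===== Notes on version B (the rewrite author's own statement) =====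
-- stated objective: idiomatic
-- what changed: B precomputes a set of lowercased member CNs once and tests each configured group name against that index, instead of A's per-DN scan that rebuilds a lowercased group list for every DN in every group list.
import Mathlib
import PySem

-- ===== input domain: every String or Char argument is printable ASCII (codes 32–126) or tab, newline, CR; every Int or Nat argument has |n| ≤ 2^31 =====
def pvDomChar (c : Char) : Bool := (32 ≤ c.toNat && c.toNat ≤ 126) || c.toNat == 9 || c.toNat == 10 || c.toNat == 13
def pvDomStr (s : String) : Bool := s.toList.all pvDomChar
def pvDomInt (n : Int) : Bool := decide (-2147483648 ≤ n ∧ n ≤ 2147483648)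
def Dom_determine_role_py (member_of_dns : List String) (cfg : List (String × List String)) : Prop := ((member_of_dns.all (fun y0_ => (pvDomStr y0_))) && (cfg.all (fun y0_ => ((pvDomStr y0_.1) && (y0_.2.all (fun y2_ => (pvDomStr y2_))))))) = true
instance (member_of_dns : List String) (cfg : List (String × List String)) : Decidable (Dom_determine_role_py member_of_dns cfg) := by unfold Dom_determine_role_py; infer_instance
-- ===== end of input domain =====

-- B builds the lowercased member-CN set once and tests group names against it (idiomatic; same result).

-- ===== PORT A =====
-- cn = dn.split(',')[0].replace('CN=', '').replace('cn=', '').strip()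
def pvCnOf (dn : String) : String :=
  PySem.Str.strip (PySem.Str.replace (PySem.Str.replace (((PySem.Str.split? dn ",").getD []).headD "") "CN=" "") "cn=" "")

def pvCnMatch (dn_list : List String) (group_names : List String) : Bool :=
  dn_list.any (fun dn =>
    (group_names.map (fun g => PySem.Str.lower g)).contains (PySem.Str.lower (pvCnOf dn)))

def determine_role_py (member_of_dns : List String) (cfg : List (String × List String)) : String :=
  let admin_groups := (PySem.Dict.mk cfg).getD "admin_groups" []
  let family_groups := (PySem.Dict.mk cfg).getD "family_groups" []
  if admin_groups ≠ [] && pvCnMatch member_of_dns admin_groups then "admin"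
  else if family_groups ≠ [] && pvCnMatch member_of_dns family_groups then "family"
  else "user"

-- ===== PORT B =====
def pvMemberCNs (member_of_dns : List String) : PySem.Set String :=
  PySem.Set.ofList (member_of_dns.map (fun dn => PySem.Str.lower (pvCnOf dn)))

def determine_role_py_alt (member_of_dns : List String) (cfg : List (String × List String)) : String :=
  let member_cns := pvMemberCNs member_of_dns
  let admin_groups := (PySem.Dict.mk cfg).getD "admin_groups" []
  if admin_groups ≠ [] && admin_groups.any (fun g => PySem.Set.contains member_cns (PySem.Str.lower g)) then "admin"
  else
    let family_groups := (PySem.Dict.mk cfg).getD "family_groups" []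
    if family_groups ≠ [] && family_groups.any (fun g => PySem.Set.contains member_cns (PySem.Str.lower g)) then "family"
    else "user"

-- ===== PRECONDITION & SPEC =====
def Spec_determine_role_py (member_of_dns : List String) (cfg : List (String × List String)) (out : String) : Prop := out = determine_role_py_alt member_of_dns cfg
instance (member_of_dns : List String) (cfg : List (String × List String)) (out : String) : Decidable (Spec_determine_role_py member_of_dns cfg out) := by unfold Spec_determine_role_py; infer_instance

-- ===== CLAIM (what is proved, stated in full; the proofs are below) =====
def Claim_equal_determine_role_py : Prop := ∀ (member_of_dns : List String) (cfg : List (String × List String)), Dom_determine_role_py member_of_dns cfg → Spec_determine_role_py member_of_dns cfg (determine_role_py member_of_dns cfg)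

-- ===== LEMMAS AND PROOFS =====
lemma cnMatch_eq_setMatch (dns gs : List String) :
    pvCnMatch dns gs = gs.any (fun g => PySem.Set.contains (pvMemberCNs dns) (PySem.Str.lower g)) := by
  rw [Bool.eq_iff_iff]
  simp only [pvCnMatch, pvMemberCNs, List.any_eq_true, List.contains_iff_mem,
    PySem.Set.contains_iff, PySem.Set.mem_ofList, List.mem_map]
  constructor
  · rintro ⟨dn, hdn, g, hg, hEq⟩
    exact ⟨g, hg, dn, hdn, hEq.symm⟩
  · rintro ⟨g, hg, dn, hdn, hEq⟩
    exact ⟨dn, hdn, g, hg, hEq.symm⟩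

-- ===== VERDICT (by name: the statement is the Claim_ definition above) =====
theorem determine_role_py_spec : Claim_equal_determine_role_py := by
  intro dns cfg _
  unfold Spec_determine_role_py determine_role_py determine_role_py_alt
  simp only [cnMatch_eq_setMatch]
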